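-- pv_equiv track=rewrite | github.com/hiranomakoto/procon | arc110_b.py | judgement
-- ===== SOURCE A (Python) =====
-- def judgement(n,s):
--     if n == 1:
--         return True
--     elif n == 2:
--         if s == '00':
--             return False
--         else:
--             return True
--     elif n == 3:
--         if s == '110' or s == '101' or s == '011':
--             return True
--         else:
--             return False
--
--     elem = '110'
--     p = s[:3]
--     if p == '110':
--         start = 3
--     elif p == '101':
--         start = 2
--     elif p == '011':
--         start = 1
--     else:
--         return False
--
--     for i,c in enumerate(s[start:]):
--         if not c == elem[i%3]:
--             return False
--     return True
-- ===== SOURCE B (Python) =====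
-- def judgement(n, s):
--     if n == 1:
--         return True
--     if n == 2:
--         return s != '00'
--     head = s[:3]
--     if head.count('0') != 1 or head.count('1') != 2:
--         return False
--     if n == 3:
--         return len(s) == 3
--     return all(s[i] == s[i + 3] for i in range(len(s) - 3))
-- ===== Notes on version B (the rewrite author's own statement) =====
-- stated objective: simpler
-- what changed: B abandons A's prefix-to-start-offset table and cyclic elem[i%3] comparison loop: it classifies the 3-char prefix by counting '0's and '1's (exactly one '0' and two '1's means a rotation of '110') and then verifies the period-3 law s[i] == s[i+3], so no phase bookkeeping or pattern characters appear at all.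
import Mathlib
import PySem

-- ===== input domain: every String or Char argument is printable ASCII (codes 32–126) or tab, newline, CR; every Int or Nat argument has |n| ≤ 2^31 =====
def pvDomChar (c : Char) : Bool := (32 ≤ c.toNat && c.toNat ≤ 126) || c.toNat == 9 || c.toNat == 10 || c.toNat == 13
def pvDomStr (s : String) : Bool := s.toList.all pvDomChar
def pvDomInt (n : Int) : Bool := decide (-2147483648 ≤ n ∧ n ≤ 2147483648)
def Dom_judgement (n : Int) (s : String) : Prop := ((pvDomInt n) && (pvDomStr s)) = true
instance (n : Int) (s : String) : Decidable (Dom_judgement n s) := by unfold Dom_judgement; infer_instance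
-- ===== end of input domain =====

-- B drops A's prefix-to-offset phase machinery and cyclic-pattern comparison entirely: it classifies
-- the first three characters by counting '0's and '1's and then checks the period-3 law s[i] == s[i+3].
-- Objective: simpler.

-- ===== PORT A =====
-- A's `for i,c in enumerate(s[start:])` loop: elem[i%3] is always in range, so getD is exact here.
def judgeLoopA (t : List Char) (i : Nat) : Bool :=
  match t with
  | [] => true
  | c :: cs => if ¬ (c = (['1','1','0'].getD (i % 3) ' ')) then false else judgeLoopA cs (i + 1)

def judgement (n : Int) (s : String) : Bool :=
  if n = 1 then true
  else if n = 2 then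
    if s.toList = "00".toList then false else true
  else if n = 3 then
    if s.toList = "110".toList ∨ s.toList = "101".toList ∨ s.toList = "011".toList then true else false
  else
    let cs := s.toList
    let p := PySem.List.slice cs none (some 3)
    let start? : Option Int :=
      if p = "110".toList then some 3
      else if p = "101".toList then some 2
      else if p = "011".toList then some 1
      else none
    match start? with
    | none => false
    | some start => judgeLoopA (PySem.List.slice cs (some start) none) 0

-- ===== PORT B =====
-- `range(len(s)-3)` is empty for len(s) < 3 in Python; Nat truncation in `(cs.length : Int) - 3`
-- is avoided by computing in Int exactly as Python does. Indices i and i+3 are in range whenever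
-- the range is nonempty, so pyGetD is exact.
def judgement_alt (n : Int) (s : String) : Bool :=
  if n = 1 then true
  else if n = 2 then decide (¬ s.toList = "00".toList)
  else
    let cs := s.toList
    let head := PySem.List.slice cs none (some 3)
    if ¬ (head.count '0' = 1 ∧ head.count '1' = 2) then false
    else if n = 3 then decide (cs.length = 3)
    else
      (PySem.List.pyRange 0 ((cs.length : Int) - 3) 1).all
        (fun i => PySem.List.pyGetD cs i ' ' == PySem.List.pyGetD cs (i + 3) ' ')

-- ===== PRECONDITION & SPEC =====
def Spec_judgement (n : Int) (s : String) (out : Bool) : Prop := out = judgement_alt n s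
instance (n : Int) (s : String) (out : Bool) : Decidable (Spec_judgement n s out) := by unfold Spec_judgement; infer_instance

-- ===== CLAIM (what is proved, stated in full; the proofs are below) =====
def Claim_equal_judgement : Prop := ∀ (n : Int) (s : String), Dom_judgement n s → Spec_judgement n s (judgement n s)

-- ===== LEMMAS AND PROOFS =====

-- the character of the infinite word (110)^ω at position k
def patF (k : Nat) : Char := ['1','1','0'].getD (k % 3) ' '

-- the cyclic word A's loop compares against, starting at phase i
def genFrom (i : Nat) (m : Nat) : List Char :=
  match m with
  | 0 => []
  | m + 1 => patF i :: genFrom (i + 1) m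

theorem patF_congr (a b : Nat) (h : a % 3 = b % 3) : patF a = patF b := by
  simp [patF, h]

theorem genFrom_congr (a b m : Nat) (h : a % 3 = b % 3) : genFrom a m = genFrom b m := by
  induction m generalizing a b with
  | zero => rfl
  | succ m ih =>
    simp only [genFrom]
    rw [patF_congr a b h, ih (a + 1) (b + 1) (by omega)]

theorem length_genFrom (i m : Nat) : (genFrom i m).length = m := by
  induction m generalizing i with
  | zero => rfl
  | succ m ih => simp [genFrom, ih]

theorem genFrom_getElem (m i j : Nat) (h : j < m) :
    (genFrom i m)[j]'(by rw [length_genFrom]; exact h) = patF (i + j) := by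
  induction m generalizing i j with
  | zero => omega
  | succ m ih =>
    cases j with
    | zero => simp [genFrom]
    | succ j =>
      simp only [genFrom, List.getElem_cons_succ]
      rw [ih (i + 1) j (by omega)]
      congr 1
      omega

theorem getD_genFrom (i m j : Nat) (hj : j < m) :
    (genFrom i m).getD j ' ' = patF (i + j) := by
  rw [List.getD_eq_getElem _ _ (by rw [length_genFrom]; exact hj), genFrom_getElem m i j hj]

theorem getD_take3 (cs : List Char) (j : Nat) (hj : j < 3) (hlen : j < cs.length) :
    (cs.take 3).getD j ' ' = cs.getD j ' ' := by
  rw [List.getD_eq_getElem _ _ (by simp; omega), List.getD_eq_getElem _ _ hlen, List.getElem_take]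

theorem getD_drop3 (cs : List Char) (j : Nat) (hj : 3 + j < cs.length) :
    (cs.drop 3).getD j ' ' = cs.getD (3 + j) ' ' := by
  rw [List.getD_eq_getElem _ _ (by simp; omega), List.getD_eq_getElem _ _ hj, List.getElem_drop]

theorem judgeLoopA_eq_genFrom (t : List Char) (i : Nat) :
    judgeLoopA t i = decide (t = genFrom i t.length) := by
  induction t generalizing i with
  | nil => simp [judgeLoopA, genFrom]
  | cons c cs ih =>
    simp only [judgeLoopA, List.length_cons, genFrom]
    by_cases h : c = patF i
    · simp [patF] at h
      simp [h, ih, patF]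
    · simp [patF] at h
      simp [h, patF]

theorem count_pair_le (p : List Char) : p.count '0' + p.count '1' ≤ p.length := by
  induction p with
  | nil => simp
  | cons c t ih =>
    by_cases h0 : c = '0' <;> by_cases h1 : c = '1' <;> simp_all <;> omega

-- length-≤3 strings with one '0' and two '1's are exactly the three rotations of "110"
theorem classify (p : List Char) (h : p.length ≤ 3) :
    (p.count '0' = 1 ∧ p.count '1' = 2) ↔
      (p = ['1','1','0'] ∨ p = ['1','0','1'] ∨ p = ['0','1','1']) := by
  constructor
  · rintro ⟨h0, h1⟩
    have hle := count_pair_le p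
    have hlen : p.length = 3 := by omega
    match p, hlen with
    | [a, b, c], _ =>
      simp only [List.count_cons, List.count_nil] at h0 h1
      by_cases ha0 : a = '0' <;> by_cases hb0 : b = '0' <;> by_cases hc0 : c = '0' <;>
        by_cases ha1 : a = '1' <;> by_cases hb1 : b = '1' <;> by_cases hc1 : c = '1' <;>
        simp_all
  · rintro (rfl | rfl | rfl) <;> simp_all

-- period-3 together with a rotation prefix pins every character to the cyclic word
theorem aux_period_gen (cs : List Char) (ph : Nat) (hpre : cs.take 3 = genFrom ph 3)
    (hper : ∀ j < cs.length - 3, cs.getD j ' ' = cs.getD (j + 3) ' ') :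
    ∀ j < cs.length, cs.getD j ' ' = patF (ph + j) := by
  intro j
  induction j using Nat.strong_induction_on with
  | _ j ih =>
    intro hj
    by_cases h3 : j < 3
    · rw [← getD_take3 cs j h3 hj, hpre, getD_genFrom ph 3 j h3]
    · have hp := hper (j - 3) (by omega)
      have he : j - 3 + 3 = j := by omega
      rw [he] at hp
      rw [← hp, ih (j - 3) (by omega) (by omega)]
      apply patF_congr
      omega

theorem core (cs : List Char) (ph : Nat) (h3 : 3 ≤ cs.length) (hpre : cs.take 3 = genFrom ph 3) :
    ((∀ j < cs.length - 3, cs.getD j ' ' = cs.getD (j + 3) ' ') ↔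
      cs.drop 3 = genFrom (ph + 3) (cs.length - 3)) := by
  constructor
  · intro hper
    apply List.ext_getElem
    · simp [length_genFrom]
    · intro j hj hj'
      have hjl : j < cs.length - 3 := by simpa using hj
      rw [genFrom_getElem _ _ _ (by rwa [length_genFrom] at hj')]
      rw [← List.getD_eq_getElem _ ' ' hj, getD_drop3 cs j (by omega)]
      rw [aux_period_gen cs ph hpre hper (3 + j) (by omega)]
      apply patF_congr
      omega
  · intro hdrop
    have hc : ∀ k < cs.length, cs.getD k ' ' = patF (ph + k) := by
      intro k hk
      by_cases hk3 : k < 3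
      · rw [← getD_take3 cs k hk3 hk, hpre, getD_genFrom ph 3 k hk3]
      · have h := congrArg (fun l => l.getD (k - 3) ' ') hdrop
        simp only at h
        rw [getD_drop3 cs (k - 3) (by omega)] at h
        rw [getD_genFrom (ph + 3) (cs.length - 3) (k - 3) (by omega)] at h
        have he : 3 + (k - 3) = k := by omega
        rw [he] at h
        rw [h]
        apply patF_congr
        omega
    intro j hjlt
    rw [hc j (by omega), hc (j + 3) (by omega)]
    apply patF_congr
    omega

-- B's range/all loop, in Prop form
theorem all_range_eq (cs : List Char) :
    ((PySem.List.pyRange 0 ((cs.length : Int) - 3) 1).all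
        (fun i => PySem.List.pyGetD cs i ' ' == PySem.List.pyGetD cs (i + 3) ' '))
      = decide (∀ j < cs.length - 3, cs.getD j ' ' = cs.getD (j + 3) ' ') := by
  rw [PySem.List.pyRange_one]
  have ht : ((cs.length : Int) - 3 - 0).toNat = cs.length - 3 := by omega
  rw [ht]
  have hpt : ∀ j : Nat, PySem.List.pyGetD cs ((0 : Int) + j) ' ' = cs.getD j ' ' := by
    intro j
    have h : (0 : Int) + j = ((j : Nat) : Int) := by omega
    rw [h, PySem.List.pyGetD_natCast]
  have hpt3 : ∀ j : Nat, PySem.List.pyGetD cs ((0 : Int) + j + 3) ' ' = cs.getD (j + 3) ' ' := by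
    intro j
    have h : (0 : Int) + j + 3 = (((j + 3 : Nat)) : Int) := by push_cast; omega
    rw [h, PySem.List.pyGetD_natCast]
  by_cases h : ∀ j < cs.length - 3, cs.getD j ' ' = cs.getD (j + 3) ' '
  · rw [decide_eq_true h, List.all_eq_true]
    intro x hx
    simp only [List.mem_map, List.mem_range] at hx
    obtain ⟨j, hj, rfl⟩ := hx
    show (PySem.List.pyGetD cs ((0 : Int) + j) ' ' == PySem.List.pyGetD cs ((0 : Int) + j + 3) ' ') = true
    rw [hpt j, hpt3 j, h j hj, beq_self_eq_true]
  · rw [decide_eq_false h, List.all_eq_false]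
    obtain ⟨j, hjn⟩ := not_forall.mp h
    obtain ⟨hj, hne⟩ := Classical.not_imp.mp hjn
    refine ⟨(0 : Int) + j, List.mem_map.mpr ⟨j, List.mem_range.mpr hj, rfl⟩, ?_⟩
    show ¬ (PySem.List.pyGetD cs ((0 : Int) + j) ' ' == PySem.List.pyGetD cs ((0 : Int) + j + 3) ' ') = true
    rw [hpt j, hpt3 j]
    simpa using hne

theorem take3_struct (cs : List Char) (x y z : Char) (h : cs.take 3 = [x, y, z]) :
    cs = x :: y :: z :: cs.drop 3 := by
  conv_lhs => rw [← List.take_append_drop 3 cs, h]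
  rfl

theorem len3_of_take3 (cs : List Char) (x y z : Char) (h : cs.take 3 = [x, y, z]) :
    3 ≤ cs.length := by
  have hh := congrArg List.length h
  simp at hh
  omega

-- the three phase cases of A, each reduced to the tail-equals-cycle statement
theorem caseA (cs : List Char) (ph : Nat) (hph : ph < 3)
    (hpre : cs.take 3 = genFrom ph 3) :
    judgeLoopA (cs.drop (3 - ph)) 0 = decide (cs.drop 3 = genFrom (ph + 3) (cs.length - 3)) := by
  interval_cases ph
  · -- "110", start 3
    rw [show (3 : Nat) - 0 = 3 from rfl, judgeLoopA_eq_genFrom]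
    apply decide_eq_decide.mpr
    rw [List.length_drop, genFrom_congr (0 + 3) 0 (cs.length - 3) (by omega)]
  · -- "101", start 2
    have hc := take3_struct cs '1' '0' '1' (by rw [hpre]; rfl)
    have hd : cs.drop (3 - 1) = '1' :: cs.drop 3 := by
      conv_lhs => rw [hc]
      rfl
    rw [hd, judgeLoopA_eq_genFrom]
    apply decide_eq_decide.mpr
    rw [List.length_cons, List.length_drop]
    rw [show ∀ m, genFrom 0 (m + 1) = patF 0 :: genFrom 1 m from fun m => rfl]
    rw [show patF 0 = '1' from rfl, List.cons.injEq,
      genFrom_congr (1 + 3) 1 (cs.length - 3) (by omega)]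
    simp
  · -- "011", start 1
    have hc := take3_struct cs '0' '1' '1' (by rw [hpre]; rfl)
    have hd : cs.drop (3 - 2) = '1' :: '1' :: cs.drop 3 := by
      conv_lhs => rw [hc]
      rfl
    rw [hd, judgeLoopA_eq_genFrom]
    apply decide_eq_decide.mpr
    rw [List.length_cons, List.length_cons, List.length_drop]
    rw [show ∀ m, genFrom 0 (m + 1 + 1) = patF 0 :: patF 1 :: genFrom 2 m from fun m => rfl]
    rw [show patF 0 = '1' from rfl, show patF 1 = '1' from rfl, List.cons.injEq, List.cons.injEq,
      genFrom_congr (2 + 3) 2 (cs.length - 3) (by omega)]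
    simp

theorem judgement_eq (n : Int) (s : String) : judgement n s = judgement_alt n s := by
  unfold judgement judgement_alt
  by_cases h1 : n = 1
  · simp [h1]
  by_cases h2 : n = 2
  · simp only [h2, if_true]
    by_cases hs : s.toList = "00".toList <;> simp [hs]
  simp only [h1, h2, if_false]
  simp only [show ("110".toList : List Char) = ['1','1','0'] from rfl,
    show ("101".toList : List Char) = ['1','0','1'] from rfl,
    show ("011".toList : List Char) = ['0','1','1'] from rfl]
  have hsl : PySem.List.slice s.toList none (some 3) = s.toList.take 3 := by
    rw [PySem.List.slice_to _ (by norm_num)]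
    rfl
  rw [hsl]
  generalize s.toList = cs
  have hlen3 : (cs.take 3).length ≤ 3 := by simp
  by_cases h3 : n = 3
  · simp only [h3]
    by_cases hl3 : cs.length = 3
    · have htk : cs.take 3 = cs := List.take_of_length_le (by omega)
      rw [htk]
      by_cases hm : cs = ['1','1','0'] ∨ cs = ['1','0','1'] ∨ cs = ['0','1','1']
      · have hcnt : cs.count '0' = 1 ∧ cs.count '1' = 2 := by
          rcases hm with h | h | h <;> rw [h] <;> exact ⟨rfl, rfl⟩
        simp [hm, hcnt, hl3]
      · have hcnt : ¬ (cs.count '0' = 1 ∧ cs.count '1' = 2) := by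
          intro hcnt
          exact hm ((classify cs (by omega)).mp hcnt)
        simp [hm, hcnt]
    · have hm : ¬ (cs = ['1','1','0'] ∨ cs = ['1','0','1'] ∨ cs = ['0','1','1']) := by
        rintro (rfl | rfl | rfl) <;> simp_all
      by_cases hcnt : (cs.take 3).count '0' = 1 ∧ (cs.take 3).count '1' = 2 <;>
        simp [hm, hcnt, hl3]
  · simp only [h3, if_false]
    by_cases hcnt : (cs.take 3).count '0' = 1 ∧ (cs.take 3).count '1' = 2
    · have hp := (classify (cs.take 3) hlen3).mp hcnt
      rcases hp with hp | hp | hp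
      · -- prefix 110, phase 0
        have hg : cs.take 3 = genFrom 0 3 := by rw [hp]; rfl
        have h3l : 3 ≤ cs.length := len3_of_take3 cs '1' '1' '0' hp
        have hsf : PySem.List.slice cs (some 3) none = cs.drop 3 := by
          rw [PySem.List.slice_from _ (by norm_num)]; rfl
        rw [hp]
        rw [if_neg (by decide : ¬¬(List.count '0' (['1','1','0'] : List Char) = 1 ∧ List.count '1' (['1','1','0'] : List Char) = 2))]
        have hca := caseA cs 0 (by norm_num) hg
        rw [show (3 : Nat) - 0 = 3 from rfl] at hca
        show judgeLoopA (PySem.List.slice cs (some 3) none) 0 = _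
        rw [hsf, hca, all_range_eq, decide_eq_decide.mpr (core cs 0 h3l hg)]
      · -- prefix 101, phase 1
        have hg : cs.take 3 = genFrom 1 3 := by rw [hp]; rfl
        have h3l : 3 ≤ cs.length := len3_of_take3 cs '1' '0' '1' hp
        have hsf : PySem.List.slice cs (some 2) none = cs.drop 2 := by
          rw [PySem.List.slice_from _ (by norm_num)]; rfl
        rw [hp]
        rw [if_neg (by decide : ¬¬(List.count '0' (['1','0','1'] : List Char) = 1 ∧ List.count '1' (['1','0','1'] : List Char) = 2))]
        have hca := caseA cs 1 (by norm_num) hg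
        rw [show (3 : Nat) - 1 = 2 from rfl] at hca
        show judgeLoopA (PySem.List.slice cs (some 2) none) 0 = _
        rw [hsf, hca, all_range_eq, decide_eq_decide.mpr (core cs 1 h3l hg)]
      · -- prefix 011, phase 2
        have hg : cs.take 3 = genFrom 2 3 := by rw [hp]; rfl
        have h3l : 3 ≤ cs.length := len3_of_take3 cs '0' '1' '1' hp
        have hsf : PySem.List.slice cs (some 1) none = cs.drop 1 := by
          rw [PySem.List.slice_from _ (by norm_num)]; rfl
        rw [hp]
        rw [if_neg (by decide : ¬¬(List.count '0' (['0','1','1'] : List Char) = 1 ∧ List.count '1' (['0','1','1'] : List Char) = 2))]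
        have hca := caseA cs 2 (by norm_num) hg
        rw [show (3 : Nat) - 2 = 1 from rfl] at hca
        show judgeLoopA (PySem.List.slice cs (some 1) none) 0 = _
        rw [hsf, hca, all_range_eq, decide_eq_decide.mpr (core cs 2 h3l hg)]
    · have hm : ¬ (cs.take 3 = ['1','1','0'] ∨ cs.take 3 = ['1','0','1'] ∨ cs.take 3 = ['0','1','1']) := by
        intro hm
        exact hcnt ((classify (cs.take 3) hlen3).mpr hm)
      obtain ⟨hm1, hm23⟩ := not_or.mp hm
      obtain ⟨hm2, hm3⟩ := not_or.mp hm23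
      simp [hm1, hm2, hm3, hcnt]

-- ===== VERDICT (by name: the statement is the Claim_ definition above) =====
theorem judgement_spec : Claim_equal_judgement := by
  intro n s _
  unfold Spec_judgement
  exact judgement_eq n s
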